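-- pv_equiv track=rewrite | github.com/gkabasele/traces_analysis | generator/handlers/flows.py | remove_empty_pkt
-- ===== SOURCE A (Python) =====
-- def remove_empty_pkt(psizes, iptimes):
--     cum_wait = 0
--     new_psize = []
--     new_iptimes = []
--
--     for ps, ipt in zip(psizes, iptimes):
--         if ps == 0:
--             cum_wait += ipt
--         else:
--             new_psize.append(ps)
--             new_iptimes.append(cum_wait + ipt)
--             cum_wait = 0
--
--     return new_psize, new_iptimes
-- ===== SOURCE B (Python) =====
-- def remove_empty_pkt(psizes, iptimes):
--     L = min(len(psizes), len(iptimes))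
--     idx = [i for i in range(L) if psizes[i] != 0]
--     new_psize = [psizes[i] for i in idx]
--     new_iptimes = []
--     start = 0
--     for i in idx:
--         new_iptimes.append(sum(iptimes[start:i + 1]))
--         start = i + 1
--     return new_psize, new_iptimes
-- ===== Notes on version B (the rewrite author's own statement) =====
-- stated objective: alternative
-- what changed: Replaces the single zip-scan with a running cum_wait accumulator by an index-then-slice decomposition: first collect the indices of non-empty packets, map them to the new sizes, then obtain each merged wait time as the sum of a slice of iptimes between consecutive non-empty indices.
import Mathlib
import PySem

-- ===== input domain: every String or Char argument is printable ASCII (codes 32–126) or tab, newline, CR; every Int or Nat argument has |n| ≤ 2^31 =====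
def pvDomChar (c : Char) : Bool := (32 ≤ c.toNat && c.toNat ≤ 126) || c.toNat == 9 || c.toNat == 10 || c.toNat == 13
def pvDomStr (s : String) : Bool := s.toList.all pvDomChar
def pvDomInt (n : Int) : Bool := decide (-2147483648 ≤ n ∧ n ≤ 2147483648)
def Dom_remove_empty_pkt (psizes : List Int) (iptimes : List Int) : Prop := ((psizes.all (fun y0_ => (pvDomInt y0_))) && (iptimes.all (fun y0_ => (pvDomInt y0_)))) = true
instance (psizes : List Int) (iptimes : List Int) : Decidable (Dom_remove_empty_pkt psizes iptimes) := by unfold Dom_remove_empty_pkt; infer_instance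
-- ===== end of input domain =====

-- B re-implements A by an index-then-slice decomposition (alternative structure, same cost); both total, equal on all inputs.

-- ===== PORT A =====
-- zip-scan carrying (cum_wait, new_psize, new_iptimes) in the fold state, appending on non-zero sizes
def remove_empty_pkt (psizes : List Int) (iptimes : List Int) : List Int × List Int :=
  let st := (psizes.zip iptimes).foldl
    (fun (st : Int × List Int × List Int) (pt : Int × Int) =>
      if pt.1 = 0 then (st.1 + pt.2, st.2.1, st.2.2)
      else ((0 : Int), st.2.1 ++ [pt.1], st.2.2 ++ [st.1 + pt.2]))
    (0, [], [])
  (st.2.1, st.2.2)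

-- ===== PORT B =====
-- L = min of lengths; idx = [i for i in range(L) if psizes[i] != 0] (i < L so getD is Python's psizes[i]);
-- new_psize maps idx; new_iptimes folds over idx with a start cursor, each entry the sum of the
-- slice iptimes[start:i+1] (0 ≤ start ≤ i+1 ≤ len(iptimes), so drop/take is exactly that slice).
def remove_empty_pkt_alt (psizes : List Int) (iptimes : List Int) : List Int × List Int :=
  let L := min psizes.length iptimes.length
  let idx := (List.range L).filter (fun i => psizes.getD i 0 ≠ 0)
  let new_psize := idx.map (fun i => psizes.getD i 0)
  let new_iptimes := (idx.foldl
    (fun (st : Nat × List Int) (i : Nat) =>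
      (i + 1, st.2 ++ [((iptimes.drop st.1).take (i + 1 - st.1)).sum]))
    (0, [])).2
  (new_psize, new_iptimes)

-- ===== PRECONDITION & SPEC =====
def Spec_remove_empty_pkt (psizes : List Int) (iptimes : List Int) (out : List Int × List Int) : Prop := out = remove_empty_pkt_alt psizes iptimes
instance (psizes : List Int) (iptimes : List Int) (out : List Int × List Int) : Decidable (Spec_remove_empty_pkt psizes iptimes out) := by unfold Spec_remove_empty_pkt; infer_instance

-- ===== CLAIM (what is proved, stated in full; the proofs are below) =====
def Claim_equal_remove_empty_pkt : Prop := ∀ (psizes : List Int) (iptimes : List Int), Dom_remove_empty_pkt psizes iptimes → Spec_remove_empty_pkt psizes iptimes (remove_empty_pkt psizes iptimes)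

-- ===== LEMMAS AND PROOFS =====

-- reference recursion: the merged-wait scan written structurally over the zipped list
def goA (cum : Int) : List (Int × Int) → List Int × List Int
  | [] => ([], [])
  | (p, t) :: rest =>
      if p = 0 then goA (cum + t) rest
      else (p :: (goA 0 rest).1, (cum + t) :: (goA 0 rest).2)

def idxZ (z : List (Int × Int)) : List Nat :=
  (List.range z.length).filter (fun i => (z.getD i (0, 0)).1 ≠ 0)

def iptFold (ts : List Int) : Nat → List Nat → List Int
  | _, [] => []
  | start, i :: rest => ((ts.drop start).take (i + 1 - start)).sum :: iptFold ts (i + 1) rest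

lemma foldA (z : List (Int × Int)) : ∀ (cum : Int) (a b : List Int),
    ((z.foldl
      (fun (st : Int × List Int × List Int) (pt : Int × Int) =>
        if pt.1 = 0 then (st.1 + pt.2, st.2.1, st.2.2)
        else ((0 : Int), st.2.1 ++ [pt.1], st.2.2 ++ [st.1 + pt.2]))
      (cum, a, b)).2)
    = (a ++ (goA cum z).1, b ++ (goA cum z).2) := by
  induction z with
  | nil => intro cum a b; simp [goA]
  | cons pt rest ih =>
      intro cum a b
      obtain ⟨p, t⟩ := pt
      by_cases hp : p = 0
      · subst hp; simp [goA, ih]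
      · simp [goA, hp, ih]

lemma foldB (ts : List Int) (idx : List Nat) : ∀ (start : Nat) (acc : List Int),
    ((idx.foldl
      (fun (st : Nat × List Int) (i : Nat) =>
        (i + 1, st.2 ++ [((ts.drop st.1).take (i + 1 - st.1)).sum]))
      (start, acc)).2)
    = acc ++ iptFold ts start idx := by
  induction idx with
  | nil => intro start acc; simp [iptFold]
  | cons i rest ih =>
      intro start acc
      simp only [List.foldl_cons, ih, iptFold]
      simp

lemma idxZ_cons (p t : Int) (z : List (Int × Int)) :
    idxZ ((p, t) :: z) = (if p = 0 then [] else [0]) ++ (idxZ z).map (· + 1) := by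
  unfold idxZ
  rw [List.length_cons, List.range_succ_eq_map, List.filter_cons]
  by_cases hp : p = 0 <;>
    simp [hp, List.filter_map, Function.comp_def, Nat.succ_eq_add_one] <;> rfl

lemma psz_eq (z : List (Int × Int)) : ∀ (c : Int),
    (idxZ z).map (fun i => (z.getD i (0, 0)).1) = (goA c z).1 := by
  induction z with
  | nil => intro c; simp [idxZ, goA]
  | cons pt rest ih =>
      intro c
      obtain ⟨p, t⟩ := pt
      rw [idxZ_cons]
      by_cases hp : p = 0
      · subst hp
        simp [goA, List.map_map, Function.comp_def, ← ih (c + t)]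
      · simp [goA, hp, List.map_map, Function.comp_def, ← ih 0]

lemma slice_head (A B X : List Int) (t : Int) :
    (((A ++ B ++ t :: X).drop A.length).take (A.length + B.length + 1 - A.length)).sum
      = B.sum + t := by
  have h1 : A ++ B ++ t :: X = A ++ (B ++ t :: X) := by simp
  have h2 : A.length + B.length + 1 - A.length = B.length + 1 := by omega
  rw [h1, h2, List.drop_left, List.take_append]
  simp [List.take_of_length_le (by omega : B.length ≤ B.length + 1)]

lemma ipt_key : ∀ (z : List (Int × Int)) (A B E : List Int),
    iptFold (A ++ B ++ z.map Prod.snd ++ E) A.length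
        ((idxZ z).map (· + (A.length + B.length)))
      = (goA B.sum z).2 := by
  intro z
  induction z with
  | nil => intro A B E; simp [idxZ, iptFold, goA]
  | cons pt rest ih =>
      intro A B E
      obtain ⟨p, t⟩ := pt
      rw [idxZ_cons]
      by_cases hp : p = 0
      · subst hp
        simp only [reduceIte, List.nil_append, List.map_map, List.map_cons, goA]
        have h1 : A ++ B ++ (t :: rest.map Prod.snd) ++ E
            = A ++ (B ++ [t]) ++ rest.map Prod.snd ++ E := by simp
        have h2 : ((idxZ rest).map ((· + (A.length + B.length)) ∘ (· + 1)))
            = (idxZ rest).map (· + (A.length + (B ++ [t]).length)) := by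
          apply List.map_congr_left; intro i _; simp [Function.comp]; omega
        rw [h1, h2, ih A (B ++ [t]) E]
        simp
      · simp only [if_neg hp, List.map_map, List.map_cons, List.cons_append,
          List.nil_append, goA, Nat.zero_add]
        rw [iptFold]
        congr 1
        · rw [show A ++ B ++ t :: List.map Prod.snd rest ++ E
              = A ++ B ++ t :: (List.map Prod.snd rest ++ E) from by simp]
          exact slice_head A B (rest.map Prod.snd ++ E) t
        · have e1 : A ++ B ++ t :: rest.map Prod.snd ++ E
              = (A ++ B ++ [t]) ++ ([] : List Int) ++ rest.map Prod.snd ++ E := by simp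
          have e2 : ((idxZ rest).map ((· + (A.length + B.length)) ∘ (· + 1)))
              = (idxZ rest).map (· + ((A ++ B ++ [t]).length + ([] : List Int).length)) := by
            apply List.map_congr_left; intro i _; simp [Function.comp]; omega
          have e3 : A.length + B.length + 1 = (A ++ B ++ [t]).length := by
            simp only [List.length_append, List.length_cons, List.length_nil]
          rw [e1, e2, e3, ih (A ++ B ++ [t]) [] E]
          simp

lemma snd_zip_restore : ∀ (ps ts : List Int),
    (ps.zip ts).map Prod.snd ++ ts.drop (min ps.length ts.length) = ts := by
  intro ps
  induction ps with
  | nil => intro ts; simp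
  | cons p ps ih =>
      intro ts
      cases ts with
      | nil => simp
      | cons t ts => simp [List.zip_cons_cons, Nat.succ_min_succ, ih ts]

lemma zip_getD_fst (ps ts : List Int) (i : Nat) (h : i < (ps.zip ts).length) :
    ((ps.zip ts).getD i (0, 0)).1 = ps.getD i 0 := by
  have h2 : i < ps.length := by
    rw [List.length_zip] at h; omega
  rw [List.getD_eq_getElem _ _ h, List.getD_eq_getElem _ _ h2, List.getElem_zip]

lemma idx_port_eq (ps ts : List Int) :
    (List.range (min ps.length ts.length)).filter (fun i => ps.getD i 0 ≠ 0)
      = idxZ (ps.zip ts) := by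
  unfold idxZ
  rw [List.length_zip]
  apply List.filter_congr
  intro i hi
  rw [List.mem_range] at hi
  have hthis := zip_getD_fst ps ts i (by rw [List.length_zip]; omega)
  simp only [List.getD] at hthis
  simp [hthis]

lemma ports_eq (ps ts : List Int) :
    remove_empty_pkt ps ts = remove_empty_pkt_alt ps ts := by
  unfold remove_empty_pkt remove_empty_pkt_alt
  simp only
  rw [foldA, idx_port_eq, foldB]
  have hips : iptFold ts 0 (idxZ (ps.zip ts)) = (goA 0 (ps.zip ts)).2 := by
    have h := ipt_key (ps.zip ts) [] [] (ts.drop (min ps.length ts.length))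
    simp only [List.length_nil, List.nil_append, List.sum_nil, Nat.add_zero] at h
    rw [snd_zip_restore] at h
    simpa using h
  have hpsz : (idxZ (ps.zip ts)).map (fun i => ps.getD i 0)
      = (goA 0 (ps.zip ts)).1 := by
    rw [← psz_eq (ps.zip ts) 0]
    apply List.map_congr_left
    intro i hi
    have hlt : i < (ps.zip ts).length := by
      unfold idxZ at hi
      have hmem := List.mem_of_mem_filter hi
      rwa [List.mem_range] at hmem
    exact (zip_getD_fst ps ts i hlt).symm
  rw [hips, hpsz]
  simp

-- ===== VERDICT (by name: the statement is the Claim_ definition above) =====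
theorem remove_empty_pkt_spec : Claim_equal_remove_empty_pkt := by
  intro ps ts _
  unfold Spec_remove_empty_pkt
  exact ports_eq ps ts
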